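-- pv_equiv track=rewrite | github.com/ankushvishnu/papercargo.com | app/agents/skills.py | parse_lead_from_text
-- ===== SOURCE A (Python) =====
-- def parse_lead_from_text(text: str) -> dict:
--     # naive extraction — replace with proper NER/model later
--     lines = text.splitlines()
--     lead = {"name": None, "email": None, "phone": None, "message": text}
--     for line in lines:
--         line = line.strip()
--         if "@" in line and lead["email"] is None:
--             lead["email"] = line
--         if any(ch.isdigit() for ch in line) and lead["phone"] is None:
--             # naive phone extraction
--             digits = "".join([c for c in line if c.isdigit()])
--             if len(digits) >= 8:
--                 lead["phone"] = digits
--     return lead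
-- ===== SOURCE B (Python) =====
-- def parse_lead_from_text(text: str) -> dict:
--     # Two independent first-match searches instead of one interleaved stateful loop.
--     lines = [line.strip() for line in text.splitlines()]
--     email = next((line for line in lines if "@" in line), None)
--     phone = next(
--         (d for d in ("".join(c for c in line if c.isdigit()) for line in lines) if len(d) >= 8),
--         None,
--     )
--     return {"name": None, "email": email, "phone": phone, "message": text}
-- ===== Notes on version B (the rewrite author's own statement) =====
-- stated objective: simpler
-- what changed: Replaced the single stateful loop that threads a mutable dict through every line with two independent first-match searches (next() over the stripped lines for the first line containing '@', and over the per-line digit strings for the first one of length >= 8), then builds the dict once.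
import Mathlib
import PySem

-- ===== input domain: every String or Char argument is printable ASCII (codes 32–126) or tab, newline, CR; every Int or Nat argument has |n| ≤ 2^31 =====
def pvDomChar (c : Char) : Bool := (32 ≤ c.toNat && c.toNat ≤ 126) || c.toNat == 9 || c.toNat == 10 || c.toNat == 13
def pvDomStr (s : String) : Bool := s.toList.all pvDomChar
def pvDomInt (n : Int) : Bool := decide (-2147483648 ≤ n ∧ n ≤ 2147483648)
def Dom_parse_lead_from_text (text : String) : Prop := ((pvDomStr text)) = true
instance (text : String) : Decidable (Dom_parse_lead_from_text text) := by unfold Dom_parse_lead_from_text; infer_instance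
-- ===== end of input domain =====

-- B replaces A's single stateful loop over a mutable dict by two independent
-- first-match searches (a simpler decomposition); same return value everywhere.

-- ===== PORT A =====
-- lead["email"] / lead["phone"] are ported with Dict.getD: both keys are always present.
def parse_lead_from_text (text : String) : List (String × Option String) :=
  ((PySem.Str.splitlines text).foldl (fun lead line =>
      let line := PySem.Str.strip line
      let lead :=
        if PySem.Str.isIn "@" line && (lead.getD "email" none).isNone then
          lead.insert "email" (some line)
        else lead
      if line.toList.any PySem.Chars.isdigit && (lead.getD "phone" none).isNone then
        let digits := PySem.Chars.join [] ((line.toList.filter PySem.Chars.isdigit).map (fun c => [c]))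
        if 8 ≤ digits.length then lead.insert "phone" (some (String.ofList digits)) else lead
      else lead)
    (((((PySem.Dict.empty).insert "name" none).insert "email" none).insert "phone" none).insert
      "message" (some text))).items

-- ===== PORT B =====
def parse_lead_from_text_alt (text : String) : List (String × Option String) :=
  let lines := (PySem.Str.splitlines text).map PySem.Str.strip
  [("name", none),
   ("email", lines.find? (fun line => PySem.Str.isIn "@" line)),
   ("phone",
     ((lines.map (fun line =>
         PySem.Chars.join [] ((line.toList.filter PySem.Chars.isdigit).map (fun c => [c])))).find?
       (fun d => decide (8 ≤ d.length))).map String.ofList),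
   ("message", some text)]

-- ===== PRECONDITION & SPEC =====
def Spec_parse_lead_from_text (text : String) (out : List (String × Option String)) : Prop := out = parse_lead_from_text_alt text
instance (text : String) (out : List (String × Option String)) : Decidable (Spec_parse_lead_from_text text out) := by unfold Spec_parse_lead_from_text; infer_instance

-- ===== CLAIM (what is proved, stated in full; the proofs are below) =====
def Claim_equal_parse_lead_from_text : Prop := ∀ (text : String), Dom_parse_lead_from_text text → Spec_parse_lead_from_text text (parse_lead_from_text text)

-- ===== LEMMAS AND PROOFS =====

-- the shape of A's dict throughout the loop: only the "email"/"phone" slots ever change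
def mkLead (t : String) (e p : Option String) : PySem.Dict String (Option String) :=
  PySem.Dict.mk [("name", none), ("email", e), ("phone", p), ("message", some t)]

-- the digit string A extracts from a line (B computes the same expression per line)
def digitsOf (line : String) : List Char :=
  PySem.Chars.join [] (((PySem.Str.strip line).toList.filter PySem.Chars.isdigit).map (fun c => [c]))

lemma mkLead_init (t : String) :
    ((((PySem.Dict.empty).insert "name" none).insert "email" none).insert "phone"
        (none : Option String)).insert "message" (some t) = mkLead t none none := by
  simp [PySem.Dict.insert, PySem.Dict.empty, PySem.Dict.contains, mkLead]

lemma mkLead_insert_email (t : String) (e p v : Option String) :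
    (mkLead t e p).insert "email" v = mkLead t v p := by
  simp [PySem.Dict.insert, PySem.Dict.contains, mkLead]

lemma mkLead_insert_phone (t : String) (e p v : Option String) :
    (mkLead t e p).insert "phone" v = mkLead t e v := by
  simp [PySem.Dict.insert, PySem.Dict.contains, mkLead]

lemma mkLead_getD_email (t : String) (e p : Option String) :
    (mkLead t e p).getD "email" none = e := by
  simp [PySem.Dict.getD, PySem.Dict.get?, mkLead]

lemma mkLead_getD_phone (t : String) (e p : Option String) :
    (mkLead t e p).getD "phone" none = p := by
  simp [PySem.Dict.getD, PySem.Dict.get?, mkLead]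

-- the email half of one loop iteration
lemma email_step (t l : String) (e p : Option String) :
    (if PySem.Str.isIn "@" (PySem.Str.strip l) && ((mkLead t e p).getD "email" none).isNone then
       (mkLead t e p).insert "email" (some (PySem.Str.strip l))
     else mkLead t e p)
    = mkLead t
        (e.or (if PySem.Str.isIn "@" (PySem.Str.strip l) then some (PySem.Str.strip l) else none))
        p := by
  cases e with
  | some v => simp [mkLead_getD_email]
  | none =>
    by_cases he : PySem.Chars.isIn ['@'] (PySem.Chars.strip l.toList) <;>
      simp [he, mkLead_getD_email, mkLead_insert_email]

-- the phone half of one loop iteration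
lemma phone_step (t l : String) (e p : Option String) :
    (if (PySem.Str.strip l).toList.any PySem.Chars.isdigit
          && ((mkLead t e p).getD "phone" none).isNone then
       if 8 ≤ (PySem.Chars.join []
           (((PySem.Str.strip l).toList.filter PySem.Chars.isdigit).map (fun c => [c]))).length then
         (mkLead t e p).insert "phone"
           (some (String.ofList (PySem.Chars.join []
             (((PySem.Str.strip l).toList.filter PySem.Chars.isdigit).map (fun c => [c])))))
       else mkLead t e p
     else mkLead t e p)
    = mkLead t e
        (p.or (if 8 ≤ (digitsOf l).length then some (String.ofList (digitsOf l)) else none)) := by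
  cases p with
  | some w => simp [mkLead_getD_phone]
  | none =>
    by_cases hd : (PySem.Str.strip l).toList.any PySem.Chars.isdigit
    · simp only [hd, mkLead_getD_phone, Option.isNone_none, Bool.and_true, if_true,
        Option.none_or, digitsOf]
      split <;> simp [mkLead_insert_phone]
    · have h0 : (PySem.Str.strip l).toList.any PySem.Chars.isdigit = false := by simpa using hd
      have hnil : List.filter PySem.Chars.isdigit (PySem.Chars.strip l.toList) = [] := by
        rw [List.filter_eq_nil_iff]
        intro c hc
        have := List.any_eq_false.mp h0 c (by simpa using hc)
        simpa using this
      have h0' : ¬ ∃ x ∈ PySem.Chars.strip l.toList, PySem.Chars.isdigit x = true := by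
        simpa using hd
      simp [h0', digitsOf, hnil, mkLead_getD_phone]

-- A's loop is exactly B's two first-match searches
lemma loop_eq (t : String) (lines : List String) (e p : Option String) :
    lines.foldl (fun lead line =>
      let line := PySem.Str.strip line
      let lead :=
        if PySem.Str.isIn "@" line && (lead.getD "email" none).isNone then
          lead.insert "email" (some line)
        else lead
      if line.toList.any PySem.Chars.isdigit && (lead.getD "phone" none).isNone then
        let digits := PySem.Chars.join [] ((line.toList.filter PySem.Chars.isdigit).map (fun c => [c]))
        if 8 ≤ digits.length then lead.insert "phone" (some (String.ofList digits)) else lead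
      else lead) (mkLead t e p)
    = mkLead t
        (e.or ((lines.map PySem.Str.strip).find? (fun l => PySem.Str.isIn "@" l)))
        (p.or (((lines.map digitsOf).find? (fun d => decide (8 ≤ d.length))).map String.ofList)) := by
  induction lines generalizing e p with
  | nil => simp
  | cons l rest ih =>
    rw [List.foldl_cons]
    have hstep : (let line := PySem.Str.strip l
        let lead :=
          if PySem.Str.isIn "@" line && ((mkLead t e p).getD "email" none).isNone then
            (mkLead t e p).insert "email" (some line)
          else mkLead t e p
        if line.toList.any PySem.Chars.isdigit && (lead.getD "phone" none).isNone then
          let digits := PySem.Chars.join [] ((line.toList.filter PySem.Chars.isdigit).map (fun c => [c]))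
          if 8 ≤ digits.length then lead.insert "phone" (some (String.ofList digits)) else lead
        else lead)
        = mkLead t
            (e.or (if PySem.Str.isIn "@" (PySem.Str.strip l) then some (PySem.Str.strip l) else none))
            (p.or (if 8 ≤ (digitsOf l).length then some (String.ofList (digitsOf l)) else none)) := by
      show (if (PySem.Str.strip l).toList.any PySem.Chars.isdigit
            && (((if PySem.Str.isIn "@" (PySem.Str.strip l) && ((mkLead t e p).getD "email" none).isNone then
                    (mkLead t e p).insert "email" (some (PySem.Str.strip l))
                  else mkLead t e p)).getD "phone" none).isNone then
          if 8 ≤ (PySem.Chars.join []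
              (((PySem.Str.strip l).toList.filter PySem.Chars.isdigit).map (fun c => [c]))).length then
            (if PySem.Str.isIn "@" (PySem.Str.strip l) && ((mkLead t e p).getD "email" none).isNone then
                (mkLead t e p).insert "email" (some (PySem.Str.strip l))
              else mkLead t e p).insert "phone"
              (some (String.ofList (PySem.Chars.join []
                (((PySem.Str.strip l).toList.filter PySem.Chars.isdigit).map (fun c => [c])))))
          else
            if PySem.Str.isIn "@" (PySem.Str.strip l) && ((mkLead t e p).getD "email" none).isNone then
              (mkLead t e p).insert "email" (some (PySem.Str.strip l))
            else mkLead t e p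
        else
          if PySem.Str.isIn "@" (PySem.Str.strip l) && ((mkLead t e p).getD "email" none).isNone then
            (mkLead t e p).insert "email" (some (PySem.Str.strip l))
          else mkLead t e p) = _
      rw [email_step]
      exact phone_step t l _ p
    rw [hstep, ih]
    have hE : (e.or (if PySem.Str.isIn "@" (PySem.Str.strip l) then some (PySem.Str.strip l) else none)).or
        ((rest.map PySem.Str.strip).find? (fun s => PySem.Str.isIn "@" s))
        = e.or (((l :: rest).map PySem.Str.strip).find? (fun s => PySem.Str.isIn "@" s)) := by
      cases e <;> by_cases h : PySem.Chars.isIn ['@'] (PySem.Chars.strip l.toList) <;>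
        simp [h, List.find?_cons]
    have hP : (p.or (if 8 ≤ (digitsOf l).length then some (String.ofList (digitsOf l)) else none)).or
        ((((rest.map digitsOf).find? (fun d => decide (8 ≤ d.length))).map String.ofList))
        = p.or ((((l :: rest).map digitsOf).find? (fun d => decide (8 ≤ d.length))).map String.ofList) := by
      cases p <;> by_cases h : 8 ≤ (digitsOf l).length <;>
        simp [h, List.find?_cons]
    rw [hE, hP]

lemma digitsOf_eq (l : String) :
    digitsOf l = (PySem.Str.strip l).toList.filter PySem.Chars.isdigit := by
  simp [digitsOf, PySem.Chars.join_nil_singletons]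

-- ===== VERDICT (by name: the statement is the Claim_ definition above) =====
theorem parse_lead_from_text_spec : Claim_equal_parse_lead_from_text := by
  intro text _
  show parse_lead_from_text text = parse_lead_from_text_alt text
  unfold parse_lead_from_text
  rw [mkLead_init, loop_eq]
  simp [parse_lead_from_text_alt, mkLead, List.map_map, Function.comp_def,
    digitsOf_eq]
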